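-- pv_equiv track=rewrite | github.com/pediapress/mwlib | src/mwlib/rl/rltables.py | splitCellContent
-- ===== SOURCE A (Python) =====
-- import math
-- from builtins import range
--
-- def splitCellContent(data):
--     # FIXME: this is a hotfix for tables which contain extremly large cells which cant be handeled by reportlab
--     n_data = []
--     splitCellCount = 14  # some arbitrary constant...: if more than 14 items are present in a cell, the cell is split into two cells in two rows
--     for row in data:
--         maxCellItems = 0
--         for cell in row:
--             maxCellItems = max(maxCellItems, len(cell))
--         if maxCellItems > splitCellCount:
--             for splitRun in range(int(math.ceil(maxCellItems / splitCellCount))):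
--                 n_row = []
--                 for cell in row:
--                     if len(cell) > splitRun * splitCellCount:
--                         n_row.append(
--                             cell[splitRun * splitCellCount : (splitRun + 1) * splitCellCount]
--                         )
--                     else:
--                         n_row.append("")
--                 n_data.append(n_row)
--         else:
--             n_data.append(row)
--     return n_data
-- ===== SOURCE B (Python) =====
-- import math
--
--
-- def splitCellContent(data):
--     # Cell-major re-implementation: chunk every cell of an oversized row into
--     # its list of 14-item slices, then transpose (zip) the chunk lists into rows.
--     out = []
--     for row in data:
--         m = max([0] + [len(c) for c in row])
--         if m <= 14:
--             out.append(row)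
--         else:
--             runs = int(math.ceil(m / 14))
--             chunks = [
--                 [c[j * 14:(j + 1) * 14] if len(c) > j * 14 else "" for j in range(runs)]
--                 for c in row
--             ]
--             out.extend(list(t) for t in zip(*chunks))
--     return out
-- ===== Notes on version B (the rewrite author's own statement) =====
-- stated objective: alternative
-- what changed: A builds each output row run-major (for each split run, re-scan the row slicing every cell inline); B is cell-major and build-then-combine: it first maps every cell of an oversized row to its full list of 14-item chunks, then transposes (zip) these chunk lists into the output rows.
import Mathlib
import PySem

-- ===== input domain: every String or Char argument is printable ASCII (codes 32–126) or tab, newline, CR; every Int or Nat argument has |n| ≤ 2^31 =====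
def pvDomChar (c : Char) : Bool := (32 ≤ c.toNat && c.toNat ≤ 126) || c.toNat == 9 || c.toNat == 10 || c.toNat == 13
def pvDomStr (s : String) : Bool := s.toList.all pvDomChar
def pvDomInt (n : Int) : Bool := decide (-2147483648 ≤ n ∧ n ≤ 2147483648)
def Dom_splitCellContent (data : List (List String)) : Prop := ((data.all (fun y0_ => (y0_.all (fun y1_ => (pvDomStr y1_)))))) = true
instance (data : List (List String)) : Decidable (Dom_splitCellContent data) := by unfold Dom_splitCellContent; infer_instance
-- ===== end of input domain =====

-- B splits oversized rows cell-major (per-cell chunk lists, then a transpose) instead of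
-- A's run-major rebuild of the row for each split run; same cost, different decomposition.

-- ===== PORT A =====
-- int(math.ceil(maxCellItems / 14)) is ported as the integer ceiling (m + 13) // 14:
-- exact here because 0 ≤ maxCellItems ≤ 2^31, where float division by 14 cannot cross
-- an integer boundary (rounding error < 2^-25, fractional parts are 0 or ≥ 1/14).
def splitCellContent (data : List (List String)) : List (List String) :=
  data.foldl
    (fun n_data row =>
      let maxCellItems : Int := row.foldl (fun m cell => max m (PySem.Str.len cell)) 0
      if maxCellItems > 14 then
        (PySem.List.pyRange 0 (PySem.Int.floordiv (maxCellItems + 13) 14) 1).foldl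
          (fun nd splitRun =>
            nd ++ [row.foldl
              (fun n_row cell =>
                n_row ++ [if PySem.Str.len cell > splitRun * 14 then
                    PySem.Str.slice cell (some (splitRun * 14)) (some ((splitRun + 1) * 14))
                  else ""]) []])
          n_data
      else n_data ++ [row])
    []

-- ===== PORT B =====
-- chunk list of one cell: its slice for every run j, "" once the cell is exhausted
def chunkCell (runs : Int) (cell : String) : List String :=
  (PySem.List.pyRange 0 runs 1).map (fun j =>
    if PySem.Str.len cell > j * 14 then
      PySem.Str.slice cell (some (j * 14)) (some ((j + 1) * 14))
    else "")

-- Python's zip(*ls) on lists of strings (tuples returned as lists): stops at the shortest list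
def zipStar (ls : List (List String)) : List (List String) :=
  if h : ls = [] ∨ ls.any (fun l => l.isEmpty) then []
  else (ls.map (fun l => l.headD "")) :: zipStar (ls.map List.tail)
termination_by (ls.headD []).length
decreasing_by
  push Not at h
  obtain ⟨h1, h2⟩ := h
  cases ls with
  | nil => exact absurd rfl h1
  | cons x rest =>
    cases x with
    | nil => simp at h2
    | cons a x' => simp

def splitCellContent_alt (data : List (List String)) : List (List String) :=
  data.foldl
    (fun out row =>
      let m : Int := PySem.List.maxD ((0 : Int) :: row.map PySem.Str.len) (fun x => x) 0
      if m ≤ 14 then out ++ [row]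
      else out ++ zipStar (row.map (chunkCell (PySem.Int.floordiv (m + 13) 14))))
    []

-- ===== PRECONDITION & SPEC =====
def Spec_splitCellContent (data : List (List String)) (out : List (List String)) : Prop := out = splitCellContent_alt data
instance (data : List (List String)) (out : List (List String)) : Decidable (Spec_splitCellContent data out) := by unfold Spec_splitCellContent; infer_instance

-- ===== CLAIM (what is proved, stated in full; the proofs are below) =====
def Claim_equal_splitCellContent : Prop := ∀ (data : List (List String)), Dom_splitCellContent data → Spec_splitCellContent data (splitCellContent data)

-- ===== LEMMAS AND PROOFS =====

-- B's max([0] + lengths) equals A's running max of the lengths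
lemma maxD_eq_foldl (row : List String) :
    PySem.List.maxD ((0 : Int) :: row.map PySem.Str.len) (fun x => x) 0 =
      row.foldl (fun m cell => max m (PySem.Str.len cell)) 0 := by
  simp [PySem.List.maxD, PySem.List.max?_id_cons, List.foldl_map]

-- transposing per-cell chunk lists yields the run-major rows (the core of A = B)
lemma zipStar_map_map (row : List String) (hrow : row ≠ []) (g : String → Int → String) :
    ∀ ks : List Int,
      zipStar (row.map (fun c => ks.map (g c))) = ks.map (fun j => row.map (fun c => g c j)) := by
  intro ks
  induction ks with
  | nil =>
    rw [zipStar, dif_pos]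
    · rfl
    · right
      cases row with
      | nil => exact absurd rfl hrow
      | cons c t => simp
  | cons k ks ih =>
    rw [zipStar, dif_neg]
    · congr 1
      · simp [List.map_map]
      · simpa [List.map_map] using ih
    · push Not
      exact ⟨by simp [hrow], by simp⟩

-- the per-row step functions of the two ports agree
lemma step_eq (acc : List (List String)) (row : List String) :
    (let maxCellItems : Int := row.foldl (fun m cell => max m (PySem.Str.len cell)) 0
     if maxCellItems > 14 then
       (PySem.List.pyRange 0 (PySem.Int.floordiv (maxCellItems + 13) 14) 1).foldl
         (fun nd splitRun =>
           nd ++ [row.foldl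
             (fun n_row cell =>
               n_row ++ [if PySem.Str.len cell > splitRun * 14 then
                   PySem.Str.slice cell (some (splitRun * 14)) (some ((splitRun + 1) * 14))
                 else ""]) []])
         acc
     else acc ++ [row]) =
    (let m : Int := PySem.List.maxD ((0 : Int) :: row.map PySem.Str.len) (fun x => x) 0
     if m ≤ 14 then acc ++ [row]
     else acc ++ zipStar (row.map (chunkCell (PySem.Int.floordiv (m + 13) 14)))) := by
  simp only [maxD_eq_foldl]
  by_cases h : row.foldl (fun m cell => max m (PySem.Str.len cell)) 0 > 14
  · have hrow : row ≠ [] := by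
      rintro rfl
      norm_num at h
    rw [if_pos h, if_neg (by omega)]
    unfold chunkCell
    rw [zipStar_map_map row hrow]
    rw [PySem.List.foldl_append_singleton_eq_map]
    congr 1
    apply List.map_congr_left
    intro j _
    rw [PySem.List.foldl_append_singleton_eq_map, List.nil_append]
  · rw [if_neg h, if_pos (by omega)]

-- ===== VERDICT (by name: the statement is the Claim_ definition above) =====
theorem splitCellContent_spec : Claim_equal_splitCellContent := by
  intro data _
  unfold Spec_splitCellContent splitCellContent splitCellContent_alt
  have h := funext fun acc => funext fun row => step_eq acc row
  rw [h]
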